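-- pv_equiv track=rewrite | github.com/alperaltuntas/flinspect | flinspect/parse_tree.py | _types_compatible
-- ===== SOURCE A (Python) =====
-- def _types_compatible(call_type, proc_type):
--     """Check if a call argument type (str) is compatible with a procedure parameter type (str)."""
--
--     # Unknown types are always considered compatible (conservative)
--     if call_type == "unknown" or proc_type == "unknown":
--         return True
--
--     # Exact match
--     if call_type == proc_type:
--         return True
--
--     # Numeric is compatible with integer or real
--     if call_type == "numeric" and proc_type in ("integer", "real"):
--         return True
--     if proc_type == "numeric" and call_type in ("integer", "real"):
--         return True
--
--     # Incompatible type pairs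
--     incompatible_pairs = [
--         (("integer", "real", "numeric"), ("character", "logical")),
--         (("character",), ("integer", "real", "logical", "numeric")),
--         (("logical",), ("integer", "real", "character", "numeric")),
--     ]
--     for group1, group2 in incompatible_pairs:
--         if call_type in group1 and proc_type in group2:
--             return False
--         if proc_type in group1 and call_type in group2:
--             return False
--
--     # For derived types, they must match exactly (if both are known)
--     if call_type.startswith("derived:") and proc_type.startswith("derived:"):
--         return call_type == proc_type
--
--     # Default: assume compatible (conservative)
--     return True
-- ===== SOURCE B (Python) =====
-- def _kind(t):
--     """Map a basic type name to its compatibility class; None if not a basic type."""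
--     if t in ("integer", "real", "numeric"):
--         return "numeric"
--     if t in ("character", "logical"):
--         return t
--     return None
--
--
-- def _types_compatible(call_type, proc_type):
--     """Check if a call argument type (str) is compatible with a procedure parameter type (str)."""
--     if call_type == "unknown" or proc_type == "unknown":
--         return True
--     if call_type == proc_type:
--         return True
--     ck = _kind(call_type)
--     pk = _kind(proc_type)
--     if ck is not None and pk is not None:
--         # Two distinct basic types are compatible iff they are in the same class
--         return ck == pk
--     # Two distinct derived types never match; anything else is conservatively compatible
--     return not (call_type.startswith("derived:") and proc_type.startswith("derived:"))
-- ===== Notes on version B (the rewrite author's own statement) =====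
-- stated objective: simpler
-- what changed: B classifies each type string into a compatibility class (numeric-family, character, logical, or none) with a helper, then decides by comparing the two classes, eliminating A's numeric special cases and its loop over grouped incompatible-pair tables.
import Mathlib
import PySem

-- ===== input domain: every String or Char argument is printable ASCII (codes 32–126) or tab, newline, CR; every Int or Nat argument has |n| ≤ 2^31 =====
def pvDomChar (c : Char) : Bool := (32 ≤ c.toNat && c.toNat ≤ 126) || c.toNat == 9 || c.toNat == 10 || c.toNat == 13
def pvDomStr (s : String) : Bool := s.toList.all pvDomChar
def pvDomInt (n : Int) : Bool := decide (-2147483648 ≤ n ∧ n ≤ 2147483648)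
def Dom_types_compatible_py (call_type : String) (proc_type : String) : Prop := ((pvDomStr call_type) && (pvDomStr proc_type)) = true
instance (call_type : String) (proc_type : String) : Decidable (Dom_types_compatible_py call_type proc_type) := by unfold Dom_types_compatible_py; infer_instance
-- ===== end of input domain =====

-- B maps each type to a compatibility class via a helper and compares classes, replacing A's numeric special cases and grouped-pairs loop (simpler).


-- ===== PORT A =====
-- incompatible_pairs table, as in A
def pvIncompatiblePairs : List (List String × List String) :=
  [ (["integer", "real", "numeric"], ["character", "logical"]),
    (["character"], ["integer", "real", "logical", "numeric"]),
    (["logical"], ["integer", "real", "character", "numeric"]) ]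

-- the 'for group1, group2 in incompatible_pairs' loop: some false = early 'return False'
def pvPairsLoop (call_type proc_type : String) : List (List String × List String) → Option Bool
  | [] => none
  | (g1, g2) :: rest =>
    if g1.contains call_type && g2.contains proc_type then some false
    else if g1.contains proc_type && g2.contains call_type then some false
    else pvPairsLoop call_type proc_type rest

def types_compatible_py (call_type : String) (proc_type : String) : Bool :=
  if call_type == "unknown" || proc_type == "unknown" then true
  else if call_type == proc_type then true
  else if call_type == "numeric" && (proc_type == "integer" || proc_type == "real") then true
  else if proc_type == "numeric" && (call_type == "integer" || call_type == "real") then true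
  else match pvPairsLoop call_type proc_type pvIncompatiblePairs with
    | some b => b
    | none =>
      if PySem.Str.startswith call_type "derived:" && PySem.Str.startswith proc_type "derived:" then
        call_type == proc_type
      else true

-- ===== PORT B =====
-- B's helper _kind: the compatibility class of a basic type name, none otherwise
def pvKind (t : String) : Option String :=
  if t == "integer" || t == "real" || t == "numeric" then some "numeric"
  else if t == "character" || t == "logical" then some t
  else none

def types_compatible_py_alt (call_type : String) (proc_type : String) : Bool :=
  if call_type == "unknown" || proc_type == "unknown" then true
  else if call_type == proc_type then true
  else match pvKind call_type, pvKind proc_type with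
    | some ck, some pk => ck == pk
    | _, _ => !(PySem.Str.startswith call_type "derived:" && PySem.Str.startswith proc_type "derived:")

-- ===== PRECONDITION & SPEC =====
def Spec_types_compatible_py (call_type : String) (proc_type : String) (out : Bool) : Prop := out = types_compatible_py_alt call_type proc_type
instance (call_type : String) (proc_type : String) (out : Bool) : Decidable (Spec_types_compatible_py call_type proc_type out) := by unfold Spec_types_compatible_py; infer_instance

-- ===== CLAIM (what is proved, stated in full; the proofs are below) =====
def Claim_equal_types_compatible_py : Prop := ∀ (call_type : String) (proc_type : String), Dom_types_compatible_py call_type proc_type → Spec_types_compatible_py call_type proc_type (types_compatible_py call_type proc_type)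

-- ===== LEMMAS AND PROOFS =====
-- decide on a list-prefix proposition equals List.isPrefixOf (bridges A's and B's startswith forms)
theorem pref_decide (a b : List Char) : decide (a <+: b) = a.isPrefixOf b := by
  by_cases h : a <+: b
  · simp [h, List.isPrefixOf_iff_prefix.mpr h]
  · simp [h]
    exact Bool.eq_false_iff.mpr (fun hb => h (List.isPrefixOf_iff_prefix.mp hb))

-- ===== VERDICT (by name: the statement is the Claim_ definition above) =====
theorem types_compatible_py_spec : Claim_equal_types_compatible_py := by
  intro c p _
  unfold Spec_types_compatible_py
  have hc : c = "integer" ∨ c = "real" ∨ c = "numeric" ∨ c = "character" ∨ c = "logical" ∨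
      (c ≠ "integer" ∧ c ≠ "real" ∧ c ≠ "numeric" ∧ c ≠ "character" ∧ c ≠ "logical") := by
    tauto
  have hp : p = "integer" ∨ p = "real" ∨ p = "numeric" ∨ p = "character" ∨ p = "logical" ∨
      (p ≠ "integer" ∧ p ≠ "real" ∧ p ≠ "numeric" ∧ p ≠ "character" ∧ p ≠ "logical") := by
    tauto
  by_cases hcu : c = "unknown"
  · simp [types_compatible_py, types_compatible_py_alt, hcu]
  by_cases hpu : p = "unknown"
  · simp [types_compatible_py, types_compatible_py_alt, hpu]
  by_cases hcp : c = p
  · simp [types_compatible_py, types_compatible_py_alt, hcp]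
  rcases hc with hc|hc|hc|hc|hc|⟨hc1,hc2,hc3,hc4,hc5⟩ <;>
    rcases hp with hp|hp|hp|hp|hp|⟨hp1,hp2,hp3,hp4,hp5⟩ <;>
    first
      | (subst_vars; decide)
      | simp_all [types_compatible_py, types_compatible_py_alt, pvPairsLoop,
          pvIncompatiblePairs, pvKind, PySem.Str.startswith, PySem.Chars.startswith] <;>
    first
      | (left; decide)
      | (right; decide)
      | simp [hcp, pref_decide]
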